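-- pv_equiv track=rewrite | github.com/vryy/4C | tests/code_test/baciheader_nightly.py | _extract_first_doxy_block
-- ===== SOURCE A (Python) =====
-- def _extract_first_doxy_block(cont):
--   blk = []
--   marker = False
--   for line in cont:
--     if (not marker) and ("/*!" in line or "/**" in line or "/*" in line or "/!*") and ("*/" not in line):
--       marker = True
--     if marker:
--       blk.append(line)
--       if "*/" in line:
--         return blk
--   return []
-- ===== SOURCE B (Python) =====
-- def _extract_first_doxy_block(cont):
--     lines = list(cont)
--     for i, line in enumerate(lines):
--         if "/*" in line and "*/" not in line:
--             for j in range(i, len(lines)):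
--                 if "*/" in lines[j]:
--                     return lines[i:j + 1]
--             return []
--     return []
-- ===== Notes on version B (the rewrite author's own statement) =====
-- stated objective: simpler
-- what changed: Replaces the marker-flag single pass (whose start condition is always true because of the stray string literal '/!*') by an index-based search: find the first line that actually contains a '/*' opener and no '*/', then scan forward for the terminator and return the slice.
-- intended difference: On inputs whose first line without '*/' lacks a '/*' opener but is followed by a line containing '*/', A starts the block at that non-comment line (its start test is always true due to the truthy literal '/!*', an evident typo for '"/!*" in line') and returns a block not starting at a comment opener, while B returns the block starting at a real '/*' opener, or an empty list if there is none, which is the intended doxygen-block extraction. — e.g. on _extract_first_doxy_block(["hello", "*/"]): A returns ["hello", "*/"], B returns []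
import Mathlib
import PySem

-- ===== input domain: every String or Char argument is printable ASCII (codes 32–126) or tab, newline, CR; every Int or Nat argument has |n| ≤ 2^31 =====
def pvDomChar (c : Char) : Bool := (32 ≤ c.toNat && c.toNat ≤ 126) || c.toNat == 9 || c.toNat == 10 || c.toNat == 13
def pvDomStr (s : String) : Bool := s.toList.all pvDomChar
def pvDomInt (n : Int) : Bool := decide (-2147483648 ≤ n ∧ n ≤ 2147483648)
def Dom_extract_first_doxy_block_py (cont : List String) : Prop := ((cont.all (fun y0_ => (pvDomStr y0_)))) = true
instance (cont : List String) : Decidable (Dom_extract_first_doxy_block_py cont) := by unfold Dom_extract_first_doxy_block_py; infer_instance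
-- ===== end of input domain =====

-- B replaces A's marker-flag pass (whose start test is always true due to the stray literal "/!*")
-- by an index-based search for a real "/*" opener plus a forward scan and slice; D_ states where the fix changes the result.


-- ===== PORT A =====
-- literal port of A's loop: marker flag, condition kept with its always-true "/!*" disjunct
def extractFirstDoxyGoA (blk : List String) (marker : Bool) : List String → List String
  | [] => []
  | line :: rest =>
    let marker :=
      if !marker &&
          (PySem.Str.isIn "/*!" line || PySem.Str.isIn "/**" line ||
           PySem.Str.isIn "/*" line || true) &&
          !(PySem.Str.isIn "*/" line) then true else marker
    if marker then
      let blk := blk ++ [line]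
      if PySem.Str.isIn "*/" line then blk else extractFirstDoxyGoA blk marker rest
    else extractFirstDoxyGoA blk marker rest

def extract_first_doxy_block_py (cont : List String) : List String :=
  extractFirstDoxyGoA [] false cont

-- ===== PORT B =====
-- inner loop of B: for j in range(i, len(lines)): if "*/" in lines[j]: return lines[i:j+1]; return []
-- (the scanned lines[j], j ≥ i, are exactly the suffix passed along)
def altScanEnd (lines : List String) (i : Nat) : List String → Nat → List String
  | [], _ => []
  | l :: rest, j =>
    if PySem.Str.isIn "*/" l then PySem.List.slice lines (some (i : Int)) (some ((j + 1 : Nat) : Int))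
    else altScanEnd lines i rest (j + 1)

-- outer loop of B: for i, line in enumerate(lines): if "/*" in line and "*/" not in line: …
def altScanStart (lines : List String) : List String → Nat → List String
  | [], _ => []
  | l :: rest, i =>
    if PySem.Str.isIn "/*" l && !(PySem.Str.isIn "*/" l) then
      altScanEnd lines i (l :: rest) i
    else altScanStart lines rest (i + 1)

def extract_first_doxy_block_py_alt (cont : List String) : List String :=
  altScanStart cont cont 0

-- ===== PRECONDITION & SPEC =====
-- On inputs whose first line without "*/" lacks a "/*" opener but is followed by a line containing "*/",
-- A starts the block at that non-comment line (its start test is always true due to the truthy literal "/!*",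
-- an evident typo for '"/!*" in line'), while B returns the block starting at a real "/*" opener (or an empty list),
-- which is the intended doxygen-block extraction.
def D_extract_first_doxy_block_py (cont : List String) : Prop :=
  (match cont.dropWhile (fun l => PySem.Str.isIn "*/" l) with
   | [] => false
   | l :: rest => !(PySem.Str.isIn "/*" l) && rest.any (fun m => PySem.Str.isIn "*/" m)) = true
instance (cont : List String) : Decidable (D_extract_first_doxy_block_py cont) := by
  unfold D_extract_first_doxy_block_py; infer_instance

def Spec_extract_first_doxy_block_py (cont : List String) (out : List String) : Prop :=
  ¬ D_extract_first_doxy_block_py cont → out = extract_first_doxy_block_py_alt cont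
instance (cont : List String) (out : List String) : Decidable (Spec_extract_first_doxy_block_py cont out) := by
  unfold Spec_extract_first_doxy_block_py; infer_instance

def pvDiffWitness_extract_first_doxy_block_py : List String := ["hello", "*/"]
def pvDiffWitnessOut_extract_first_doxy_block_py : (List String) × (List String) :=
  (["hello", "*/"], [])

-- ===== CLAIM (what is proved, stated in full; the proofs are below) =====
def Claim_unchanged_extract_first_doxy_block_py : Prop :=
  ∀ (cont : List String), Dom_extract_first_doxy_block_py cont →
    Spec_extract_first_doxy_block_py cont (extract_first_doxy_block_py cont)
def Claim_changed_extract_first_doxy_block_py : Prop :=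
  Dom_extract_first_doxy_block_py (pvDiffWitness_extract_first_doxy_block_py) ∧
  D_extract_first_doxy_block_py (pvDiffWitness_extract_first_doxy_block_py) ∧
  extract_first_doxy_block_py (pvDiffWitness_extract_first_doxy_block_py) = pvDiffWitnessOut_extract_first_doxy_block_py.1 ∧
  extract_first_doxy_block_py_alt (pvDiffWitness_extract_first_doxy_block_py) = pvDiffWitnessOut_extract_first_doxy_block_py.2 ∧
  pvDiffWitnessOut_extract_first_doxy_block_py.1 ≠ pvDiffWitnessOut_extract_first_doxy_block_py.2
def Claim_exact_extract_first_doxy_block_py : Prop :=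
  ∀ (cont : List String), Dom_extract_first_doxy_block_py cont →
    D_extract_first_doxy_block_py cont →
    extract_first_doxy_block_py cont ≠ extract_first_doxy_block_py_alt cont

-- ===== LEMMAS AND PROOFS =====

-- take one more element past a known drop
theorem take_succ_of_drop {α : Type} {xs : List α} {k : Nat} {l : α} {rest : List α}
    (h : xs.drop k = l :: rest) : xs.take (k + 1) = xs.take k ++ [l] := by
  rw [List.take_add, h]
  rfl

-- the head surviving dropWhile fails the predicate
theorem dropWhile_head_false {α : Type} (P : α → Bool) :
    ∀ (xs : List α) {l : α} {rest : List α}, xs.dropWhile P = l :: rest → P l = false := by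
  intro xs
  induction xs with
  | nil => intro l rest h; simp [List.dropWhile] at h
  | cons a t ih =>
    intro l rest h
    by_cases hp : P a = true
    · rw [List.dropWhile_cons, if_pos hp] at h
      exact ih h
    · rw [List.dropWhile_cons, if_neg hp] at h
      cases h
      simpa using hp

-- L1: once A's marker is set, A's collect phase equals B's inner scan (slice form)
theorem goA_true_eq_scanEnd :
    ∀ (s : List String) (lines : List String) (i j : Nat),
      lines.drop j = s → i ≤ j →
      extractFirstDoxyGoA ((lines.drop i).take (j - i)) true s = altScanEnd lines i s j := by
  intro s
  induction s with
  | nil => intro lines i j _ _; rfl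
  | cons l rest ih =>
    intro lines i j hdrop hij
    have hdrop' : lines.drop (j + 1) = rest := by
      have h1 : (lines.drop j).drop 1 = rest := by rw [hdrop]; rfl
      rwa [List.drop_drop] at h1
    have hdi : (lines.drop i).drop (j - i) = l :: rest := by
      rw [List.drop_drop]
      have hij' : i + (j - i) = j := by omega
      rw [hij', hdrop]
    have htake : (lines.drop i).take (j - i + 1) = (lines.drop i).take (j - i) ++ [l] :=
      take_succ_of_drop hdi
    have harith : j + 1 - i = j - i + 1 := by omega
    have hslice : PySem.List.slice lines (some (i : Int)) (some ((j : Int) + 1)) =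
        (lines.drop i).take (j + 1 - i) := by
      have := PySem.List.slice_natCast lines i (j + 1)
      push_cast at this
      exact this
    by_cases hp : PySem.Chars.isIn ['*', '/'] l.toList = true
    · -- terminator found: blk ++ [l] = lines[i:j+1]
      simp [extractFirstDoxyGoA, altScanEnd, hp, hslice, harith, htake]
    · have hrec := ih lines i (j + 1) hdrop' (by omega)
      rw [harith, htake] at hrec
      simp [extractFirstDoxyGoA, altScanEnd, hp, hrec]

-- collect phase returns [] when no line contains the terminator
theorem goA_true_nil_of_no_end :
    ∀ (s : List String) (blk : List String),
      (∀ m ∈ s, PySem.Chars.isIn ['*', '/'] m.toList = false) →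
      extractFirstDoxyGoA blk true s = [] := by
  intro s
  induction s with
  | nil => intro blk _; rfl
  | cons l rest ih =>
    intro blk h
    have hl := h l (by simp)
    simp [extractFirstDoxyGoA, hl, ih (blk ++ [l]) (fun m hm => h m (by simp [hm]))]

-- B's inner scan returns [] when no line of the suffix contains the terminator
theorem scanEnd_nil_of_no_end :
    ∀ (s : List String) (lines : List String) (i j : Nat),
      (∀ m ∈ s, PySem.Chars.isIn ['*', '/'] m.toList = false) → altScanEnd lines i s j = [] := by
  intro s
  induction s with
  | nil => intro lines i j _; rfl
  | cons l rest ih =>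
    intro lines i j h
    have hl := h l (by simp)
    simp [altScanEnd, hl, ih lines i (j + 1) (fun m hm => h m (by simp [hm]))]

-- B's outer scan returns [] when no line contains the terminator
theorem scanStart_nil_of_no_end :
    ∀ (s : List String) (lines : List String) (i : Nat),
      (∀ m ∈ s, PySem.Chars.isIn ['*', '/'] m.toList = false) → altScanStart lines s i = [] := by
  intro s
  induction s with
  | nil => intro lines i _; rfl
  | cons l rest ih =>
    intro lines i h
    by_cases hq : PySem.Chars.isIn ['/', '*'] l.toList = true
    · simp [altScanStart, hq, h l (by simp), scanEnd_nil_of_no_end (l :: rest) lines i i h]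
    · simp [altScanStart, hq, ih lines (i + 1) (fun m hm => h m (by simp [hm]))]

-- collect phase never returns [] when some line contains the terminator
theorem goA_true_ne_nil_of_end :
    ∀ (s : List String) (blk : List String),
      s.any (fun m => PySem.Chars.isIn ['*', '/'] m.toList) = true →
      extractFirstDoxyGoA blk true s ≠ [] := by
  intro s
  induction s with
  | nil => intro blk h; simp at h
  | cons l rest ih =>
    intro blk h
    by_cases hp : PySem.Chars.isIn ['*', '/'] l.toList = true
    · simp [extractFirstDoxyGoA, hp]
    · have hrest : rest.any (fun m => PySem.Chars.isIn ['*', '/'] m.toList) = true := by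
        simp at h
        rcases h with h | h
        · exact absurd h hp
        · simpa using h
      simp only [extractFirstDoxyGoA]
      simp [hp, ih (blk ++ [l]) hrest]

-- collect phase output is [] or extends the accumulator
theorem goA_true_shape :
    ∀ (s : List String) (blk : List String),
      extractFirstDoxyGoA blk true s = [] ∨ ∃ u, extractFirstDoxyGoA blk true s = blk ++ u := by
  intro s
  induction s with
  | nil => intro blk; exact Or.inl rfl
  | cons l rest ih =>
    intro blk
    by_cases hp : PySem.Chars.isIn ['*', '/'] l.toList = true
    · exact Or.inr ⟨[l], by simp [extractFirstDoxyGoA, hp]⟩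
    · rcases ih (blk ++ [l]) with h | ⟨u, hu⟩
      · exact Or.inl (by simp [extractFirstDoxyGoA, hp, h])
      · exact Or.inr ⟨[l] ++ u, by simp [extractFirstDoxyGoA, hp, hu]⟩

-- B's output is [] or starts with a line containing "/*"
theorem scanStart_shape :
    ∀ (s : List String) (lines : List String) (i : Nat), lines.drop i = s →
      altScanStart lines s i = [] ∨
      ∃ l' u, altScanStart lines s i = l' :: u ∧ PySem.Chars.isIn ['/', '*'] l'.toList = true := by
  intro s
  induction s with
  | nil => intro lines i _; exact Or.inl rfl
  | cons l rest ih =>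
    intro lines i hdrop
    have hdrop' : lines.drop (i + 1) = rest := by
      have h1 : (lines.drop i).drop 1 = rest := by rw [hdrop]; rfl
      rwa [List.drop_drop] at h1
    by_cases hql : PySem.Chars.isIn ['/', '*'] l.toList = true
    · by_cases hpl : PySem.Chars.isIn ['*', '/'] l.toList = true
      · -- guard is false: keep scanning
        simp only [altScanStart]
        simp only [show (PySem.Str.isIn "/*" l && !(PySem.Str.isIn "*/" l)) = false by simp [hql, hpl]]
        simpa using ih lines (i + 1) hdrop'
      · -- B starts the block here
        simp only [altScanStart]
        simp only [show (PySem.Str.isIn "/*" l && !(PySem.Str.isIn "*/" l)) = true by simp [hql, hpl]]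
        rw [if_pos trivial]
        have h1 : altScanEnd lines i (l :: rest) i =
            extractFirstDoxyGoA ((lines.drop i).take (i - i)) true (l :: rest) :=
          (goA_true_eq_scanEnd (l :: rest) lines i i hdrop (le_refl i)).symm
        have h2 : extractFirstDoxyGoA ([] : List String) true (l :: rest) =
            extractFirstDoxyGoA [l] true rest := by
          simp [extractFirstDoxyGoA, hpl]
        rcases goA_true_shape rest [l] with h3 | ⟨u, h3⟩
        · exact Or.inl (by simp [h1, h2, h3])
        · exact Or.inr ⟨l, u, by simp [h1, h2, h3], hql⟩
    · simp only [altScanStart]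
      simp only [show (PySem.Str.isIn "/*" l && !(PySem.Str.isIn "*/" l)) = false by simp [hql]]
      simpa using ih lines (i + 1) hdrop'

-- A's skip phase = first non-"*/" line, expressed via dropWhile
theorem goA_false_dropWhile :
    ∀ (s : List String),
      extractFirstDoxyGoA [] false s =
        extractFirstDoxyGoA [] false
          (s.dropWhile (fun l => PySem.Chars.isIn ['*', '/'] l.toList)) := by
  intro s
  induction s with
  | nil => rfl
  | cons l rest ih =>
    by_cases hp : PySem.Chars.isIn ['*', '/'] l.toList = true
    · rw [List.dropWhile_cons, if_pos hp, ← ih]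
      simp [extractFirstDoxyGoA, hp]
    · rw [List.dropWhile_cons, if_neg hp]

-- L2: outside the change region the two programs agree (generalized over the suffix)
theorem main_eq :
    ∀ (s : List String) (lines : List String) (i : Nat), lines.drop i = s →
      (s.dropWhile (fun l => PySem.Chars.isIn ['*', '/'] l.toList) = [] ∨
        ∃ l rest, s.dropWhile (fun l => PySem.Chars.isIn ['*', '/'] l.toList) = l :: rest ∧
          (PySem.Chars.isIn ['/', '*'] l.toList = true ∨
           rest.any (fun m => PySem.Chars.isIn ['*', '/'] m.toList) = false)) →
      extractFirstDoxyGoA [] false s = altScanStart lines s i := by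
  intro s
  induction s with
  | nil => intro lines i _ _; rfl
  | cons l rest ih =>
    intro lines i hdrop hcond
    have hdrop' : lines.drop (i + 1) = rest := by
      have h1 : (lines.drop i).drop 1 = rest := by rw [hdrop]; rfl
      rwa [List.drop_drop] at h1
    by_cases hp : PySem.Chars.isIn ['*', '/'] l.toList = true
    · -- both skip this line
      have hcond' : rest.dropWhile (fun l => PySem.Chars.isIn ['*', '/'] l.toList) = [] ∨
          ∃ l r, rest.dropWhile (fun l => PySem.Chars.isIn ['*', '/'] l.toList) = l :: r ∧
            (PySem.Chars.isIn ['/', '*'] l.toList = true ∨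
             r.any (fun m => PySem.Chars.isIn ['*', '/'] m.toList) = false) := by
        rwa [List.dropWhile_cons, if_pos hp] at hcond
      have hguard : (PySem.Str.isIn "/*" l && !(PySem.Str.isIn "*/" l)) = false := by simp [hp]
      simp only [altScanStart, hguard]
      rw [if_neg (by simp)]
      rw [← ih lines (i + 1) hdrop' hcond']
      simp [extractFirstDoxyGoA, hp]
    · rw [List.dropWhile_cons, if_neg hp] at hcond
      have hcond' : PySem.Chars.isIn ['/', '*'] l.toList = true ∨
          rest.any (fun m => PySem.Chars.isIn ['*', '/'] m.toList) = false := by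
        rcases hcond with h | ⟨l', rest', heq, hc⟩
        · exact absurd h (by simp)
        · cases heq; exact hc
      by_cases hql : PySem.Chars.isIn ['/', '*'] l.toList = true
      · -- both start the block here
        simp only [altScanStart]
        simp only [show (PySem.Str.isIn "/*" l && !(PySem.Str.isIn "*/" l)) = true by simp [hql, hp]]
        rw [if_pos trivial]
        have h1 : altScanEnd lines i (l :: rest) i =
            extractFirstDoxyGoA ((lines.drop i).take (i - i)) true (l :: rest) :=
          (goA_true_eq_scanEnd (l :: rest) lines i i hdrop (le_refl i)).symm
        rw [h1]
        simp [extractFirstDoxyGoA, hp]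
      · -- A starts here but no terminator ever follows: both return []
        have hnoend : rest.any (fun m => PySem.Chars.isIn ['*', '/'] m.toList) = false := by
          rcases hcond' with h | h
          · exact absurd h hql
          · exact h
        have hnone : ∀ m ∈ (l :: rest), PySem.Chars.isIn ['*', '/'] m.toList = false := by
          intro m hm
          rcases List.mem_cons.mp hm with rfl | hm'
          · simpa using hp
          · simpa using (List.any_eq_false.mp hnoend) m hm'
        rw [scanStart_nil_of_no_end (l :: rest) lines i hnone]
        have hstep : extractFirstDoxyGoA ([] : List String) false (l :: rest) =
            extractFirstDoxyGoA [l] true rest := by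
          simp [extractFirstDoxyGoA, hp]
        rw [hstep]
        exact goA_true_nil_of_no_end rest [l] (fun m hm => hnone m (by simp [hm]))

-- ===== VERDICT (by name: the statements are the Claim_ definitions above) =====
theorem extract_first_doxy_block_py_spec : Claim_unchanged_extract_first_doxy_block_py := by
  intro cont _ hnD
  show extract_first_doxy_block_py cont = extract_first_doxy_block_py_alt cont
  apply main_eq cont cont 0 (by simp)
  unfold D_extract_first_doxy_block_py at hnD
  have hsame : cont.dropWhile (fun l => PySem.Str.isIn "*/" l) =
      cont.dropWhile (fun l => PySem.Chars.isIn ['*', '/'] l.toList) := by simp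
  rw [hsame] at hnD
  cases h : cont.dropWhile (fun l => PySem.Chars.isIn ['*', '/'] l.toList) with
  | nil => exact Or.inl rfl
  | cons l rest =>
    rw [h] at hnD
    refine Or.inr ⟨l, rest, rfl, ?_⟩
    by_cases hql : PySem.Chars.isIn ['/', '*'] l.toList = true
    · exact Or.inl hql
    · right
      by_contra hc
      apply hnD
      simp at hc ⊢
      exact ⟨by simpa using hql, by simpa using hc⟩

theorem extract_first_doxy_block_py_changed : Claim_changed_extract_first_doxy_block_py := by
  unfold Claim_changed_extract_first_doxy_block_py; decide

theorem extract_first_doxy_block_py_tight : Claim_exact_extract_first_doxy_block_py := by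
  intro cont _ hD
  unfold D_extract_first_doxy_block_py at hD
  have hsame : cont.dropWhile (fun l => PySem.Str.isIn "*/" l) =
      cont.dropWhile (fun l => PySem.Chars.isIn ['*', '/'] l.toList) := by simp
  rw [hsame] at hD
  cases h : cont.dropWhile (fun l => PySem.Chars.isIn ['*', '/'] l.toList) with
  | nil => rw [h] at hD; simp at hD
  | cons l rest =>
    rw [h] at hD
    simp only [Bool.and_eq_true] at hD
    have hql : PySem.Chars.isIn ['/', '*'] l.toList = false := by
      have := hD.1; simpa using this
    have hany : rest.any (fun m => PySem.Chars.isIn ['*', '/'] m.toList) = true := by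
      have := hD.2; simpa using this
    have hpl : PySem.Chars.isIn ['*', '/'] l.toList = false :=
      dropWhile_head_false (fun l => PySem.Chars.isIn ['*', '/'] l.toList) cont h
    -- A's value: a nonempty block starting with l (which lacks "/*")
    have hA1 : extract_first_doxy_block_py cont = extractFirstDoxyGoA [l] true rest := by
      show extractFirstDoxyGoA [] false cont = _
      rw [goA_false_dropWhile cont, h]
      simp [extractFirstDoxyGoA, hpl]
    have hAne : extractFirstDoxyGoA [l] true rest ≠ [] :=
      goA_true_ne_nil_of_end rest [l] hany
    obtain ⟨u, hu⟩ : ∃ u, extractFirstDoxyGoA [l] true rest = l :: u := by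
      rcases goA_true_shape rest [l] with hnil | ⟨u, hu⟩
      · exact absurd hnil hAne
      · exact ⟨u, by simpa using hu⟩
    -- B's value: [] or a block starting with a "/*" line
    rcases scanStart_shape cont cont 0 (by simp) with hB | ⟨l', u', hB, hql'⟩
    · intro hc
      exact hAne (by rw [← hA1, hc]; exact hB)
    · intro hc
      rw [hA1, hu] at hc
      rw [show extract_first_doxy_block_py_alt cont = altScanStart cont cont 0 from rfl, hB] at hc
      obtain ⟨rfl, -⟩ : l = l' ∧ u = u' := by
        constructor
        · exact (List.cons.injEq _ _ _ _ ▸ hc : l = l' ∧ u = u').1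
        · exact (List.cons.injEq _ _ _ _ ▸ hc : l = l' ∧ u = u').2
      rw [hql'] at hql
      exact Bool.true_eq_false.mp hql
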